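-- pv_equiv track=rewrite | github.com/park9707/Algorithm | programmers/디펜스 게임/[2차]디펜스 게임.py | solution
-- ===== SOURCE A (Python) =====
-- import heapq
--
-- def solution(n, k, enemy):
--     heap = enemy[:k]
--     heapq.heapify(heap)
--     for i in range(k, len(enemy)):
--         heapq.heappush(heap, enemy[i])
--         enemy_num = heapq.heappop(heap)
--         if n >= enemy_num:
--             n -= enemy_num
--         else:
--             return i
--     return len(enemy)
-- ===== SOURCE B (Python) =====
-- def solution(n, k, enemy):
--     # Check each prefix independently: surviving m rounds costs the sum of the
--     # (m - k) smallest enemies among the first m (the k largest are wiped free).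
--     # Return one less than the first prefix whose cost exceeds n.
--     for m in range(k + 1, len(enemy) + 1):
--         if sum(sorted(enemy[:m])[:m - k]) > n:
--             return m - 1
--     return len(enemy)
-- ===== Notes on version B (the rewrite author's own statement) =====
-- stated objective: alternative
-- what changed: Replaces A's streaming min-heap simulation (mutable heap and budget carried across rounds) by independent per-prefix checks: for each round count m, sort the first m enemies and test whether the sum of the m-k smallest exceeds n.
-- outside the precondition, e.g. on solution(16, -3, [5, 6, 6]): A returns -1, B returns 2; on solution(0, -5, [1]): A raises IndexError, B returns 0
import Mathlib
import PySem

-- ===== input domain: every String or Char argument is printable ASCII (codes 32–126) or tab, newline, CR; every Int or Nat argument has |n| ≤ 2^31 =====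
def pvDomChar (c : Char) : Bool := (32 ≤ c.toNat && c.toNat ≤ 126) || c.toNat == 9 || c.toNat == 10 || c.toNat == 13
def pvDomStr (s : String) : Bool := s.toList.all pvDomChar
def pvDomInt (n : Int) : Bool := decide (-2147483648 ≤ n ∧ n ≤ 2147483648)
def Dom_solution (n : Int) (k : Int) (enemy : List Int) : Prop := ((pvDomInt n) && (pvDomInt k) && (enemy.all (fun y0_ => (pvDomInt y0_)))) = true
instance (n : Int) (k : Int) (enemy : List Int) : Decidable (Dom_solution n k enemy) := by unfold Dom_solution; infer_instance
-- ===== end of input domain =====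

-- B replaces A's streaming min-heap simulation by independent per-prefix checks
-- (sort each prefix, sum its m-k smallest): same values, a different decomposition.
-- Pre_solution excludes negative k, on which A uses Python negative-index/slice
-- wraparound (and raises IndexError when k < -len(enemy)); an attack count is
-- naturally nonnegative.


-- ===== PORT A =====
-- heappush + heappop pair of A's loop body, modelled at the multiset level:
-- the popped element is the minimum of the heap's contents (heapq's guarantee),
-- the remaining heap is the contents minus one copy of it.
def solutionAPop (l : List Int) : Int × List Int :=
  match PySem.List.min? l (fun y => y) with
  | none => (0, l)          -- unreachable: the heap was just pushed onto
  | some e => (e, (PySem.List.remove? l e).getD l)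

-- 'for i in range(k, len(enemy)): heappush; enemy_num = heappop; if n >= enemy_num: n -= enemy_num else: return i'
def solutionALoop (enemy : List Int) (idxs : List Int) (n : Int) (heap : List Int) : Int :=
  match idxs with
  | [] => PySem.List.len enemy
  | i :: rest =>
    let heap1 := heap ++ [PySem.List.pyGetD enemy i 0]
    let p := solutionAPop heap1
    if n ≥ p.1 then solutionALoop enemy rest (n - p.1) p.2 else i

def solution (n : Int) (k : Int) (enemy : List Int) : Int :=
  solutionALoop enemy (PySem.List.pyRange k (PySem.List.len enemy) 1) n
    (PySem.List.slice enemy none (some k))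

-- ===== PORT B =====
-- sum(sorted(enemy[:m])[:m - k])
def solutionBCost (k : Int) (enemy : List Int) (m : Int) : Int :=
  (PySem.List.slice
    (PySem.List.sorted (PySem.List.slice enemy none (some m)) (fun y => y) false)
    none (some (m - k))).sum

-- 'for m in range(k + 1, len(enemy) + 1): if cost(m) > n: return m - 1'
def solutionBLoop (n : Int) (k : Int) (enemy : List Int) (ms : List Int) : Int :=
  match ms with
  | [] => PySem.List.len enemy
  | m :: rest =>
    if solutionBCost k enemy m > n then m - 1 else solutionBLoop n k enemy rest

def solution_alt (n : Int) (k : Int) (enemy : List Int) : Int :=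
  solutionBLoop n k enemy (PySem.List.pyRange (k + 1) (PySem.List.len enemy + 1) 1)

-- ===== PRECONDITION & SPEC =====
-- Pre_ excludes negative k (A slices and indexes with Python's negative-index
-- wraparound there, raising IndexError when k < -len(enemy)); it admits every
-- input with a nonnegative special-attack count.
def Pre_solution (_n : Int) (k : Int) (_enemy : List Int) : Prop := 0 ≤ k
instance (n : Int) (k : Int) (enemy : List Int) : Decidable (Pre_solution n k enemy) := by unfold Pre_solution; infer_instance
def pvWitness_solution : Int × Int × List Int := (7, 1, [4, 2, 4, 8, 1])
def Spec_solution (n : Int) (k : Int) (enemy : List Int) (out : Int) : Prop := out = solution_alt n k enemy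
instance (n : Int) (k : Int) (enemy : List Int) (out : Int) : Decidable (Spec_solution n k enemy out) := by unfold Spec_solution; infer_instance

-- ===== CLAIM (what is proved, stated in full; the proofs are below) =====
def Claim_equal_solution : Prop := ∀ (n : Int) (k : Int) (enemy : List Int), Dom_solution n k enemy → Pre_solution n k enemy → Spec_solution n k enemy (solution n k enemy)

-- ===== LEMMAS AND PROOFS =====

-- sorted insertion: Mathlib's orderedInsert with ≤ on Int
def oins (x : Int) (s : List Int) : List Int := List.orderedInsert (· ≤ ·) x s

lemma oins_pairwise (x : Int) (s : List Int) (hs : List.Pairwise (· ≤ ·) s) :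
    List.Pairwise (· ≤ ·) (oins x s) :=
  List.Pairwise.orderedInsert x s hs

lemma sortI_append_singleton (l : List Int) (x : Int) :
    PySem.List.sorted (l ++ [x]) (fun y => y) false
      = oins x (PySem.List.sorted l (fun y => y) false) := by
  apply PySem.List.eq_of_perm_of_pairwise_le_of_injective (fun y => y) (fun a b h => h)
  · exact (PySem.List.sorted_perm _ _ _).trans <| (List.perm_append_singleton x l).trans
      <| ((PySem.List.sorted_perm l _ _).symm.cons x).trans (List.perm_orderedInsert _ x _).symm
  · exact PySem.List.sorted_pairwise _ _
  · exact oins_pairwise x _ (PySem.List.sorted_pairwise _ _)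

lemma core_step (s : List Int) (x : Int) : ∀ (j : Nat), List.Pairwise (· ≤ ·) s →
    j ≤ s.length → ∀ (e : Int), e ∈ x :: s.drop j →
    (∀ y ∈ x :: s.drop j, e ≤ y) →
    ((oins x s).take (j + 1)).sum = (s.take j).sum + e
      ∧ ((x :: s.drop j).erase e).Perm ((oins x s).drop (j + 1)) := by
  induction s with
  | nil =>
    intro j _ hj e hmem hmin
    have hj0 : j = 0 := by simp at hj; omega
    subst hj0
    have hx : e = x := by simpa using hmem
    subst hx
    simp [oins]
  | cons a t ih =>
    intro j hs hj e hmem hmin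
    have hat : ∀ y ∈ a :: t, a ≤ y := by
      intro y hy
      rcases List.mem_cons.mp hy with h | h
      · omega
      · exact List.rel_of_pairwise_cons hs h
    by_cases hxa : x ≤ a
    · -- oins x (a :: t) = x :: a :: t ; x is the global minimum
      have hoins : oins x (a :: t) = x :: a :: t := by
        simp [oins, List.orderedInsert, hxa]
      have hex : e = x := by
        have h1 : e ≤ x := hmin x (by simp)
        have h2 : x ≤ e := by
          rcases List.mem_cons.mp hmem with h | h
          · omega
          · exact le_trans hxa (hat e (List.mem_of_mem_drop h))
        omega
      subst hex
      cases j with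
      | zero =>
        constructor
        · simp [hoins]
        · simp [hoins]
      | succ j' =>
        have hj' : j' ≤ t.length := by simpa using hj
        constructor
        · rw [hoins, List.take_succ_cons, List.sum_cons, List.take_succ_cons, List.sum_cons]
          ring
        · rw [hoins, List.erase_cons_head, List.drop_succ_cons]
          exact List.Perm.refl _
    · -- a < x : oins x (a :: t) = a :: oins x t
      have hoins : oins x (a :: t) = a :: oins x t := by
        simp [oins, List.orderedInsert, hxa]
      cases j with
      | zero =>
        -- e is the min of x :: a :: t, and a is that minimum
        have hea : e = a := by
          have h1 : e ≤ a := hmin a (by simp)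
          have h2 : a ≤ e := by
            rcases List.mem_cons.mp hmem with h | h
            · omega
            · exact hat e h
          omega
        refine ⟨by simp [hoins, hea], ?_⟩
        have hxe : x ≠ a := by omega
        rw [hea, hoins]
        simp only [List.drop_zero]
        have h1 : (x :: a :: t).erase a = x :: t := by
          rw [List.erase_cons_tail (by simp [hxe]), List.erase_cons_head]
        rw [h1]
        simpa using (List.perm_orderedInsert _ x t).symm
      | succ j' =>
        have hj' : j' ≤ t.length := by simpa using hj
        have hdrop : (a :: t).drop (j' + 1) = t.drop j' := List.drop_succ_cons
        rw [hdrop] at hmem hmin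
        obtain ⟨ihsum, ihperm⟩ := ih j' (List.Pairwise.of_cons hs) hj' e hmem hmin
        constructor
        · rw [hoins, List.take_succ_cons, List.sum_cons, ihsum, List.take_succ_cons, List.sum_cons]
          ring
        · rw [hoins, hdrop, List.drop_succ_cons]
          exact ihperm

lemma loop_eq (enemy : List Int) (n0 : Int) (k : Nat) (d : Nat) :
    ∀ (i : Nat), i + d = enemy.length → k ≤ i → ∀ (heap : List Int),
      heap.Perm ((PySem.List.sorted (enemy.take i) (fun y => y) false).drop (i - k)) →
      solutionALoop enemy (PySem.List.pyRange (i : Int) (enemy.length : Int) 1)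
          (n0 - ((PySem.List.sorted (enemy.take i) (fun y => y) false).take (i - k)).sum) heap
        = solutionBLoop n0 (k : Int) enemy
            (PySem.List.pyRange ((i : Int) + 1) ((enemy.length : Int) + 1) 1) := by
  induction d with
  | zero =>
    intro i hiL hki heap _
    have h1 : (enemy.length : Int) ≤ (i : Int) := by omega
    rw [PySem.List.pyRange_one_eq_nil h1, PySem.List.pyRange_one_eq_nil (by omega)]
    rfl
  | succ d ih =>
    intro i hiL hki heap hperm
    have hiL' : i < enemy.length := by omega
    set s := PySem.List.sorted (enemy.take i) (fun y => y) false with hs_def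
    set j := i - k with hj_def
    have hslen : s.length = i := by
      rw [hs_def, (PySem.List.sorted_perm _ _ _).length_eq, List.length_take]
      omega
    have hx : PySem.List.pyGetD enemy (i : Int) 0 = enemy[i] := by
      simp [List.getElem?_eq_getElem hiL']
    set x := enemy[i] with hx_def
    -- take (i+1) = take i ++ [x]
    have htake : enemy.take (i + 1) = enemy.take i ++ [x] := by
      rw [List.take_add_one, hx_def]
      simp [List.getElem?_eq_getElem hiL']
    have hsort' : PySem.List.sorted (enemy.take (i + 1)) (fun y => y) false = oins x s := by
      rw [htake, sortI_append_singleton]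
    -- the A step
    rw [PySem.List.pyRange_one_cons (show (i : Int) < (enemy.length : Int) by exact_mod_cast hiL')]
    rw [PySem.List.pyRange_one_cons (show (i : Int) + 1 < (enemy.length : Int) + 1 by omega)]
    simp only [solutionALoop, solutionBLoop, hx]
    set heap1 := heap ++ [x] with hheap1
    have hp1 : heap1.Perm (x :: s.drop j) :=
      (hperm.append_right [x]).trans (List.perm_append_singleton x _)
    have hne : heap1 ≠ [] := by simp [hheap1]
    obtain ⟨e, he⟩ : ∃ e, PySem.List.min? heap1 (fun y => y) = some e := by
      cases hm : PySem.List.min? heap1 (fun y => y) with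
      | none => exact absurd ((PySem.List.min?_eq_none_iff _ _).mp hm) hne
      | some e => exact ⟨e, rfl⟩
    have hemem : e ∈ x :: s.drop j := hp1.subset (PySem.List.min?_mem he)
    have hemin : ∀ y ∈ x :: s.drop j, e ≤ y := fun y hy =>
      PySem.List.min?_id_le he y (hp1.symm.subset hy)
    have hjs : j ≤ s.length := by omega
    obtain ⟨hsum, hperm2⟩ := core_step s x j
      (by rw [hs_def]; exact PySem.List.sorted_pairwise _ _) hjs e hemem hemin
    -- the pop
    have hpop : solutionAPop heap1 = (e, heap1.erase e) := by
      simp [solutionAPop, he, PySem.List.remove?_eq_some_erase heap1 e (hp1.mem_iff.mpr hemem)]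
    -- B's cost at m = i + 1
    have hcost : solutionBCost (k : Int) enemy ((i : Int) + 1) = (s.take j).sum + e := by
      rw [solutionBCost]
      have h1 : ((i : Int) + 1) = ((i + 1 : Nat) : Int) := by push_cast; ring
      have h2 : ((i + 1 : Nat) : Int) - (k : Int) = ((j + 1 : Nat) : Int) := by
        rw [hj_def]; push_cast; omega
      rw [h1, PySem.List.slice_to_natCast, hsort', h2, PySem.List.slice_to_natCast, hsum]
    rw [hpop]
    by_cases hbr : n0 - (s.take j).sum ≥ e
    · have hA : (n0 - (s.take j).sum ≥ e) = True := by simp [hbr]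
      have hB : ¬ (solutionBCost (k : Int) enemy ((i : Int) + 1) > n0) := by
        rw [hcost]; omega
      simp only [hcost, if_neg (by omega : ¬ ((s.take j).sum + e > n0)), if_pos hbr]
      have hperm3 : (heap1.erase e).Perm
          ((PySem.List.sorted (enemy.take (i + 1)) (fun y => y) false).drop (i + 1 - k)) := by
        rw [hsort', (by omega : i + 1 - k = j + 1)]
        exact ((hp1.erase e).trans hperm2)
      have hn : n0 - (s.take j).sum - e
          = n0 - ((PySem.List.sorted (enemy.take (i + 1)) (fun y => y) false).take (i + 1 - k)).sum := by
        rw [hsort', (by omega : i + 1 - k = j + 1), hsum]; ring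
      rw [hn]
      have := ih (i + 1) (by omega) (by omega) (heap1.erase e) hperm3
      push_cast at this ⊢
      rw [this]
    · simp only [hcost, if_neg hbr, if_pos (by omega : (s.take j).sum + e > n0)]
      ring

theorem solution_spec : Claim_equal_solution := by
  intro n k enemy _ hpre
  have hk0 : 0 ≤ k := hpre
  obtain ⟨kn, rfl⟩ := Int.eq_ofNat_of_zero_le hk0
  show solution n (kn : Int) enemy = solution_alt n (kn : Int) enemy
  rw [solution, solution_alt, PySem.List.len_eq]
  by_cases hk : kn ≤ enemy.length
  · have h0 := loop_eq enemy n kn (enemy.length - kn) kn (by omega) le_rfl (enemy.take kn)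
      (by simpa [Nat.sub_self] using (PySem.List.sorted_perm (enemy.take kn) (fun y => y) false).symm)
    simpa [Nat.sub_self, PySem.List.slice_to_natCast] using h0
  · rw [PySem.List.pyRange_one_eq_nil (by exact_mod_cast (by omega : (enemy.length : Int) ≤ (kn : Int))),
      PySem.List.pyRange_one_eq_nil (by omega)]
    rfl
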